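-- pv_equiv track=rewrite | github.com/DariusGiannoli/HAPTIC-GUI | Tactile_Brush/v3.py | get_grid_position
-- ===== SOURCE A (Python) =====
-- from typing import List, Tuple, Optional, Dict
--
-- GRID_ROWS = 4
--
-- GRID_COLS = 4
--
-- USER_LAYOUT = [
--     [3, 2, 1, 0],      # Row 0
--     [7, 6, 5, 4],      # Row 1
--     [8, 9, 10, 11],    # Row 2
--     [15, 14, 13, 12]   # Row 3
-- ]
--
-- def get_grid_position(actuator_id: int, spacing_mm: float) -> Tuple[float, float]:
--     """Convert actuator ID to (x, y) position in mm for user's 4x4 layout"""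
--     if actuator_id < 0 or actuator_id >= 16:
--         raise ValueError(f"Invalid actuator ID {actuator_id} for 4x4 grid")
--
--     for row in range(GRID_ROWS):
--         for col in range(GRID_COLS):
--             if USER_LAYOUT[row][col] == actuator_id:
--                 x_positions = [0, 50, 110, 160]
--                 y_positions = [0, 60, 120, 180]
--                 x = x_positions[col]
--                 y = y_positions[row]
--                 return (x, y)
--
--     raise ValueError(f"Actuator ID {actuator_id} not found in layout")
-- ===== SOURCE B (Python) =====
-- def get_grid_position(actuator_id: int, spacing_mm: float):
--     """Convert actuator ID to (x, y) position in mm for user's 4x4 layout"""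
--     if actuator_id < 0 or actuator_id >= 16:
--         raise ValueError(f"Invalid actuator ID {actuator_id} for 4x4 grid")
--     row, r = divmod(actuator_id, 4)
--     col = r if row == 2 else 3 - r  # rows 0,1,3 are stored reversed; row 2 is forward
--     return ([0, 50, 110, 160][col], [0, 60, 120, 180][row])
-- ===== Notes on version B (the rewrite author's own statement) =====
-- stated objective: simpler
-- what changed: Replaced the nested 4x4 scan over USER_LAYOUT with direct arithmetic: row = id // 4 and col = id % 4 (mirrored as 3 - id % 4 except in row 2), then index the position lists.
import Mathlib
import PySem

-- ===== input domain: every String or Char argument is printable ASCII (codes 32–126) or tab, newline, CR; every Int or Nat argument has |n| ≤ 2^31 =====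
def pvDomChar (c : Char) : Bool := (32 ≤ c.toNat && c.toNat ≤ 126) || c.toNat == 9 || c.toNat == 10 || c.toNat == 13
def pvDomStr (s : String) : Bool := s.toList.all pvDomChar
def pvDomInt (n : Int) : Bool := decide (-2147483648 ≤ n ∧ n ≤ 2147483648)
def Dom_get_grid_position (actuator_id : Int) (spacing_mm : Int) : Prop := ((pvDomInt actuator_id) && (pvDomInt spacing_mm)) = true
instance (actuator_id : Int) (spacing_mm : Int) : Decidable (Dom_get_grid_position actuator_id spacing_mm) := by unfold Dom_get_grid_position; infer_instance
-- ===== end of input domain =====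

-- B replaces A's nested 4x4 layout scan with direct row/column arithmetic (simpler, O(1)).


-- ===== PORT A =====
def pvUserLayout : List (List Int) := [[3,2,1,0],[7,6,5,4],[8,9,10,11],[15,14,13,12]]

-- nested for-loops over range(4); the Python `return` inside the loop is the first `some` kept by the fold.
-- The ValueError cases (id < 0 or id >= 16) are excluded by Pre_; `.getD (0,0)` is only the unreachable fallback.
def get_grid_position (actuator_id : Int) (spacing_mm : Int) : Int × Int :=
  ((PySem.List.pyRange 0 4 1).foldl (fun acc row =>
    match acc with
    | some v => some v
    | none =>
      (PySem.List.pyRange 0 4 1).foldl (fun acc2 col =>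
        match acc2 with
        | some v => some v
        | none =>
          if ((PySem.List.pyGet? pvUserLayout row).bind (fun r => PySem.List.pyGet? r col)) = some actuator_id then
            let x_positions : List Int := [0, 50, 110, 160]
            let y_positions : List Int := [0, 60, 120, 180]
            some (((PySem.List.pyGet? x_positions col).getD 0), ((PySem.List.pyGet? y_positions row).getD 0))
          else none) none) none).getD (0, 0)


-- ===== PORT B =====
-- row = id // 4, col mirrored except in row 2; indexing is in range whenever Pre_ holds.
def get_grid_position_alt (actuator_id : Int) (spacing_mm : Int) : Int × Int :=
  let row := PySem.Int.floordiv actuator_id 4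
  let r := PySem.Int.mod actuator_id 4
  let col := if row = 2 then r else 3 - r
  ((PySem.List.pyGet? ([0, 50, 110, 160] : List Int) col).getD 0,
   (PySem.List.pyGet? ([0, 60, 120, 180] : List Int) row).getD 0)


-- ===== PRECONDITION & SPEC =====
-- Pre_ excludes exactly the inputs where A raises ValueError (actuator_id outside 0..15).
def Pre_get_grid_position (actuator_id : Int) (spacing_mm : Int) : Prop :=
  0 ≤ actuator_id ∧ actuator_id < 16
instance (actuator_id : Int) (spacing_mm : Int) : Decidable (Pre_get_grid_position actuator_id spacing_mm) := by unfold Pre_get_grid_position; infer_instance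
def pvWitness_get_grid_position : Int × Int := (5, 60)

def Spec_get_grid_position (actuator_id : Int) (spacing_mm : Int) (out : Int × Int) : Prop := out = get_grid_position_alt actuator_id spacing_mm
instance (actuator_id : Int) (spacing_mm : Int) (out : Int × Int) : Decidable (Spec_get_grid_position actuator_id spacing_mm out) := by unfold Spec_get_grid_position; infer_instance

-- ===== CLAIM (what is proved, stated in full; the proofs are below) =====
def Claim_equal_get_grid_position : Prop := ∀ (actuator_id : Int) (spacing_mm : Int), Dom_get_grid_position actuator_id spacing_mm → Pre_get_grid_position actuator_id spacing_mm → Spec_get_grid_position actuator_id spacing_mm (get_grid_position actuator_id spacing_mm)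

-- ===== LEMMAS AND PROOFS =====

-- ===== VERDICT (by name: the statement is the Claim_ definition above) =====
theorem get_grid_position_spec : Claim_equal_get_grid_position := by
  intro a s _ hp
  unfold Spec_get_grid_position
  obtain ⟨h0, h1⟩ := hp
  interval_cases a <;> rfl
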